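-- pv_equiv track=rewrite | github.com/GeodesicResearch/geodesic-megatron | scripts/data/mask_stage_tags_in_packed.py | build_new_mask
-- ===== SOURCE A (Python) =====
-- CORE = (50462, 78097, 15981)          # stage, =t, raining  -- invariant
--
-- OPEN_LT = 1060                         # "<"
--
-- CLOSE_LT = 1885                        # "</"
--
-- GT_TOKENS = (1062, 1561)               # ">" and ">\n" (the 5th tag token)
--
-- IM_END = 11                            # <|im_end|>
--
-- def find_tag_spans(input_ids: list[int]) -> tuple[list[tuple[int, int]], list[tuple[int, int]]]:
--     """Scan for open/close tag token-spans.
--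
--     Returns:
--         (open_spans, close_spans) — each a list of (start, end_inclusive)
--         indices into input_ids. Spans are 5 tokens wide by construction.
--     """
--     n = len(input_ids)
--     opens, closes = [], []
--     for i in range(n - 2):
--         if input_ids[i] == CORE[0] and input_ids[i + 1] == CORE[1] and input_ids[i + 2] == CORE[2]:
--             # core match at i..i+2
--             # Left token (lt) is at i-1 (should be "<" or "</")
--             # Right token (gt) is at i+3 (should be ">" or ">\n")
--             if i - 1 < 0 or i + 3 >= n:
--                 continue
--             lt = input_ids[i - 1]
--             gt = input_ids[i + 3]
--             if gt not in GT_TOKENS: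
--                 continue
--             start, end = i - 1, i + 3
--             if lt == OPEN_LT:
--                 opens.append((start, end))
--             elif lt == CLOSE_LT:
--                 closes.append((start, end))
--             # else: core token triplet found but not preceded by <; ignore
--     return opens, closes
--
-- def build_new_mask(input_ids: list[int], variant: str = "v1") -> tuple[list[bool], int]:
--     """Return (new_mask_unshifted, num_pairs) for one packed row.
--
--     new_mask[i] = True iff input_ids[i] is strictly between a matched open
--     and the next close tag. Everything else is False.
--
--     Shift correction is applied by caller.
--     """
--     n = len(input_ids)
--     mask = [False] * n
--     opens, closes = find_tag_spans(input_ids)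
--     # Greedy pair the next available close for each open in order
--     pairs = 0
--     ci = 0
--     for o_start, o_end in opens:
--         while ci < len(closes) and closes[ci][0] <= o_end:
--             ci += 1
--         if ci >= len(closes):
--             break
--         c_start, c_end = closes[ci]
--         ci += 1
--         pairs += 1
--         # Content strictly between: input_ids[o_end+1 .. c_start-1]
--         content_lo = o_end + 1
--         content_hi = c_start - 1
--         if content_hi < content_lo:
--             continue  # empty content
--         for j in range(content_lo, content_hi + 1):
--             mask[j] = True
--         if variant in ("v2", "v3", "v4"):
--             # Also train on the <|im_end|> that typically follows the
--             # close-tag newline, so the model learns to stop.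
--             # Look up to 3 tokens after close_end for an <|im_end|> sentinel.
--             for k in range(c_end + 1, min(n, c_end + 4)):
--                 if input_ids[k] == IM_END:
--                     mask[k] = True
--                     break
--         if variant == "v4":
--             # Additionally include the 5 tokens of the </stage=training>
--             # close tag in the loss. The open tag stays masked — the
--             # difference between v2 and v4 is that the model learns to
--             # emit the close tag as part of its response.
--             for k in range(c_start, c_end + 1):
--                 mask[k] = True
--     return mask, pairs
-- ===== SOURCE B (Python) =====
-- CORE = (50462, 78097, 15981)
-- OPEN_LT = 1060
-- CLOSE_LT = 1885
-- GT_TOKENS = (1062, 1561)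
-- IM_END = 11
--
--
-- def build_new_mask(input_ids: list[int], variant: str = "v1") -> tuple[list[bool], int]:
--     """Collect the masked intervals during pairing, then materialise the
--     mask with a difference array and one prefix-sum sweep."""
--     n = len(input_ids)
--     # One linear scan for the 5-token tag spans, recorded as (start, lt).
--     opens, closes = [], []
--     for i in range(1, n - 3):
--         if (input_ids[i], input_ids[i + 1], input_ids[i + 2]) == CORE \
--                 and input_ids[i + 3] in GT_TOKENS:
--             lt = input_ids[i - 1]
--             if lt == OPEN_LT:
--                 opens.append((i - 1, i + 3))
--             elif lt == CLOSE_LT: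
--                 closes.append((i - 1, i + 3))
--     # Greedy pairing; record intervals to mask instead of writing cells.
--     extra = variant in ("v2", "v3", "v4")
--     ivs = []
--     pairs = 0
--     ci = 0
--     for _, o_end in opens:
--         while ci < len(closes) and closes[ci][0] <= o_end:
--             ci += 1
--         if ci >= len(closes):
--             break
--         c_start, c_end = closes[ci]
--         ci += 1
--         pairs += 1
--         if c_start - 1 < o_end + 1:
--             continue  # empty content: nothing is masked for this pair
--         ivs.append((o_end + 1, c_start - 1))
--         if extra:
--             for k in range(c_end + 1, min(n, c_end + 4)):
--                 if input_ids[k] == IM_END: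
--                     ivs.append((k, k))
--                     break
--         if variant == "v4":
--             ivs.append((c_start, c_end))
--     # Difference array + prefix-sum sweep.
--     diff = [0] * (n + 1)
--     for lo, hi in ivs:
--         diff[lo] += 1
--         diff[hi + 1] -= 1
--     mask = []
--     acc = 0
--     for j in range(n):
--         acc += diff[j]
--         mask.append(acc > 0)
--     return mask, pairs
-- ===== Notes on version B (the rewrite author's own statement) =====
-- stated objective: alternative
-- what changed: Instead of writing True into the mask cell-by-cell for every matched pair, B collects the masked intervals during the greedy pairing and materialises the mask once with a difference array and a single prefix-sum sweep.
import Mathlib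
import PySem

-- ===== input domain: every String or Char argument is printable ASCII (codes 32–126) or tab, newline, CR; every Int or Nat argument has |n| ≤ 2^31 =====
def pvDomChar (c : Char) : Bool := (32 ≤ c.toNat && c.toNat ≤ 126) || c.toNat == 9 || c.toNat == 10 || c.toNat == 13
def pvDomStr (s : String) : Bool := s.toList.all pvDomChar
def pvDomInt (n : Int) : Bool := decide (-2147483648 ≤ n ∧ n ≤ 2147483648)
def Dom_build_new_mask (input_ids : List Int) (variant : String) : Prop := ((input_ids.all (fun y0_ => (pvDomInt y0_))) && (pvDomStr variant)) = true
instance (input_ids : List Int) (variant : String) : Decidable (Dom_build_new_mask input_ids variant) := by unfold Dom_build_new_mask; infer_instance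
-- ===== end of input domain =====

-- B replaces A's per-pair per-cell mask writes by collecting the masked intervals during
-- pairing and materialising the mask with a difference array and one prefix-sum sweep
-- (alternative algorithm; not measurably faster on the timed inputs).

-- ===== PORT A =====
def fts_step (input_ids : List Int) (n : Int) (st : List (Int × Int) × List (Int × Int)) (i : Int) :
    List (Int × Int) × List (Int × Int) :=
  if PySem.List.pyGetD input_ids i 0 = 50462 ∧ PySem.List.pyGetD input_ids (i + 1) 0 = 78097 ∧
      PySem.List.pyGetD input_ids (i + 2) 0 = 15981 then
    if i - 1 < 0 ∨ i + 3 ≥ n then st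
    else
      let lt := PySem.List.pyGetD input_ids (i - 1) 0
      let gt := PySem.List.pyGetD input_ids (i + 3) 0
      if ¬(gt = 1062 ∨ gt = 1561) then st
      else if lt = 1060 then (st.1 ++ [(i - 1, i + 3)], st.2)
      else if lt = 1885 then (st.1, st.2 ++ [(i - 1, i + 3)])
      else st
  else st

def find_tag_spans (input_ids : List Int) : List (Int × Int) × List (Int × Int) :=
  let n : Int := input_ids.length
  (PySem.List.pyRange 0 (n - 2) 1).foldl (fts_step input_ids n) ([], [])

-- while ci < len(closes) and closes[ci][0] <= o_end: ci += 1   (used verbatim by A and B)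
def skipCloses (closes : List (Int × Int)) (o_end : Int) (ci : Nat) : Nat :=
  if h : ci < closes.length ∧ (closes.getD ci (0, 0)).1 ≤ o_end then
    skipCloses closes o_end (ci + 1)
  else ci
termination_by closes.length - ci
decreasing_by omega

-- for j in range(lo, hi+1): mask[j] = True
def setRange (mask : List Bool) (lo hi : Int) : List Bool :=
  (PySem.List.pyRange lo (hi + 1) 1).foldl (fun m j => PySem.List.pySetD m j true) mask

-- for k in range(a, b): if input_ids[k] == IM_END: …; break   (find-first, used by A and B)
def findImEnd (input_ids : List Int) (a b : Int) : Option Int :=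
  (PySem.List.pyRange a b 1).find? (fun k => PySem.List.pyGetD input_ids k 0 == 11)

def aPairLoop (input_ids : List Int) (n : Int) (variant : String) (closes : List (Int × Int)) :
    List (Int × Int) → List Bool → Int → Nat → List Bool × Int
  | [], mask, pairs, _ => (mask, pairs)
  | (_, o_end) :: rest, mask, pairs, ci =>
    let ci' := skipCloses closes o_end ci
    if ci' ≥ closes.length then (mask, pairs)
    else
      let c := closes.getD ci' (0, 0)
      let pairs' := pairs + 1
      let lo := o_end + 1
      let hi := c.1 - 1
      if hi < lo then aPairLoop input_ids n variant closes rest mask pairs' (ci' + 1)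
      else
        let mask1 := setRange mask lo hi
        let mask2 :=
          if variant = "v2" ∨ variant = "v3" ∨ variant = "v4" then
            match findImEnd input_ids (c.2 + 1) (min n (c.2 + 4)) with
            | some k => PySem.List.pySetD mask1 k true
            | none => mask1
          else mask1
        let mask3 := if variant = "v4" then setRange mask2 c.1 c.2 else mask2
        aPairLoop input_ids n variant closes rest mask3 pairs' (ci' + 1)

def build_new_mask (input_ids : List Int) (variant : String) : List Bool × Int :=
  let n : Int := input_ids.length
  let mask := List.replicate input_ids.length false
  let oc := find_tag_spans input_ids
  aPairLoop input_ids n variant oc.2 oc.1 mask 0 0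

-- ===== PORT B =====
def bScan_step (input_ids : List Int) (st : List (Int × Int) × List (Int × Int)) (i : Int) :
    List (Int × Int) × List (Int × Int) :=
  if (PySem.List.pyGetD input_ids i 0, PySem.List.pyGetD input_ids (i + 1) 0,
        PySem.List.pyGetD input_ids (i + 2) 0) = ((50462 : Int), (78097 : Int), (15981 : Int)) ∧
      (PySem.List.pyGetD input_ids (i + 3) 0 = 1062 ∨ PySem.List.pyGetD input_ids (i + 3) 0 = 1561) then
    let lt := PySem.List.pyGetD input_ids (i - 1) 0
    if lt = 1060 then (st.1 ++ [(i - 1, i + 3)], st.2)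
    else if lt = 1885 then (st.1, st.2 ++ [(i - 1, i + 3)])
    else st
  else st

def bScan (input_ids : List Int) : List (Int × Int) × List (Int × Int) :=
  let n : Int := input_ids.length
  (PySem.List.pyRange 1 (n - 3) 1).foldl (bScan_step input_ids) ([], [])

def bPairLoop (input_ids : List Int) (n : Int) (variant : String) (closes : List (Int × Int)) :
    List (Int × Int) → List (Int × Int) → Int → Nat → List (Int × Int) × Int
  | [], ivs, pairs, _ => (ivs, pairs)
  | (_, o_end) :: rest, ivs, pairs, ci =>
    let ci' := skipCloses closes o_end ci
    if ci' ≥ closes.length then (ivs, pairs)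
    else
      let c := closes.getD ci' (0, 0)
      let pairs' := pairs + 1
      if c.1 - 1 < o_end + 1 then bPairLoop input_ids n variant closes rest ivs pairs' (ci' + 1)
      else
        let ivs1 := ivs ++ [(o_end + 1, c.1 - 1)]
        let ivs2 :=
          if variant = "v2" ∨ variant = "v3" ∨ variant = "v4" then
            match findImEnd input_ids (c.2 + 1) (min n (c.2 + 4)) with
            | some k => ivs1 ++ [(k, k)]
            | none => ivs1
          else ivs1
        let ivs3 := if variant = "v4" then ivs2 ++ [(c.1, c.2)] else ivs2
        bPairLoop input_ids n variant closes rest ivs3 pairs' (ci' + 1)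

-- diff[lo] += 1; diff[hi+1] -= 1
def diffAdd (d : List Int) (lo hi : Int) : List Int :=
  let d1 := PySem.List.pySetD d lo (PySem.List.pyGetD d lo 0 + 1)
  PySem.List.pySetD d1 (hi + 1) (PySem.List.pyGetD d1 (hi + 1) 0 - 1)

-- acc = 0; for j in range(n): acc += diff[j]; mask.append(acc > 0)
def sweep (diff : List Int) (n : Int) : List Bool :=
  ((PySem.List.pyRange 0 n 1).foldl
    (fun (st : List Bool × Int) j =>
      let acc := st.2 + PySem.List.pyGetD diff j 0
      (st.1 ++ [decide (acc > 0)], acc)) ([], 0)).1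

def build_new_mask_alt (input_ids : List Int) (variant : String) : List Bool × Int :=
  let n : Int := input_ids.length
  let oc := bScan input_ids
  let ip := bPairLoop input_ids n variant oc.2 oc.1 [] 0 0
  let diff := ip.1.foldl (fun d p => diffAdd d p.1 p.2) (List.replicate (input_ids.length + 1) 0)
  (sweep diff n, ip.2)

-- ===== PRECONDITION & SPEC =====
def Spec_build_new_mask (input_ids : List Int) (variant : String) (out : List Bool × Int) : Prop := out = build_new_mask_alt input_ids variant
instance (input_ids : List Int) (variant : String) (out : List Bool × Int) : Decidable (Spec_build_new_mask input_ids variant out) := by unfold Spec_build_new_mask; infer_instance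

-- ===== CLAIM (what is proved, stated in full; the proofs are below) =====
def Claim_equal_build_new_mask : Prop := ∀ (input_ids : List Int) (variant : String), Dom_build_new_mask input_ids variant → Spec_build_new_mask input_ids variant (build_new_mask input_ids variant)

-- ===== LEMMAS AND PROOFS =====

lemma step_agree (ids : List Int) (n : Int) (i : Int) (h1 : 1 ≤ i) (h2 : i < n - 3)
    (st : List (Int × Int) × List (Int × Int)) :
    fts_step ids n st i = bScan_step ids st i := by
  have hb : ¬ (i - 1 < 0 ∨ i + 3 ≥ n) := by omega
  simp only [fts_step, bScan_step, Prod.mk.injEq, hb, if_false]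
  split_ifs <;> first | rfl | tauto

lemma fts_step_zero (ids : List Int) (n : Int) (st : List (Int × Int) × List (Int × Int)) :
    fts_step ids n st 0 = st := by
  simp [fts_step]

lemma fts_step_last (ids : List Int) (n : Int) (st : List (Int × Int) × List (Int × Int)) :
    fts_step ids n st (n - 3) = st := by
  simp [fts_step]

lemma sum_set_int (d : List Int) (t : Nat) (v : Int) (h : t < d.length) :
    (d.set t v).sum = d.sum + (v - d[t]) := by
  induction d generalizing t with
  | nil => simp at h
  | cons x xs ih =>
    cases t with
    | zero => simp [List.set]; omega
    | succ t =>
      have ht : t < xs.length := by simpa using h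
      simp only [List.set, List.sum_cons, ih t ht, List.getElem_cons_succ]
      omega

lemma sum_take_set (d : List Int) (t : Nat) (v : Int) (m : Nat) (h : t < d.length) :
    ((d.set t v).take m).sum = (d.take m).sum + (if t < m then v - d[t] else 0) := by
  rw [List.take_set]
  by_cases hm : t < m
  · rw [sum_set_int _ t v (by simp [List.length_take]; omega)]
    simp [hm, List.getElem_take]
  · rw [List.set_eq_of_length_le (by simp [List.length_take]; omega)]
    simp [hm]

lemma setRange_singleton (m : List Bool) (k : Int) :
    setRange m k k = PySem.List.pySetD m k true := by
  simp [setRange, PySem.List.pyRange_one_singleton]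

def cover (ivs : List (Int × Int)) (j : Int) : Bool :=
  ivs.any (fun p => decide (p.1 ≤ j ∧ j ≤ p.2))

lemma cover_iff_countP (ivs : List (Int × Int)) (j : Int) :
    cover ivs j = decide (0 < (ivs.countP (fun p => decide (p.1 ≤ j ∧ j ≤ p.2)) : Int)) := by
  rcases h : cover ivs j with _ | _
  · simp only [cover, List.any_eq_false] at h
    have h0 : ivs.countP (fun p => decide (p.1 ≤ j ∧ j ≤ p.2)) = 0 := by
      rw [List.countP_eq_zero]; intro p hp; simpa using h p hp
    rw [h0]; simp
  · simp only [cover, List.any_eq_true] at h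
    obtain ⟨p, hp, hpd⟩ := h
    have hc : 0 < ivs.countP (fun p => decide (p.1 ≤ j ∧ j ≤ p.2)) :=
      List.countP_pos_iff.mpr ⟨p, hp, hpd⟩
    symm; rw [decide_eq_true_iff]; exact_mod_cast hc

lemma length_setRange (m : List Bool) (lo hi : Int) : (setRange m lo hi).length = m.length := by
  unfold setRange
  generalize PySem.List.pyRange lo (hi + 1) 1 = l
  induction l generalizing m with
  | nil => rfl
  | cons x xs ih => simp [List.foldl_cons, ih, PySem.List.length_pySetD]

lemma setRange_nil (m : List Bool) (lo hi : Int) (h : hi < lo) : setRange m lo hi = m := by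
  rw [setRange, PySem.List.pyRange_one_eq_nil (by omega)]; rfl

lemma setRange_cons (m : List Bool) (lo hi : Int) (h : lo ≤ hi) :
    setRange m lo hi = setRange (PySem.List.pySetD m lo true) (lo + 1) hi := by
  rw [setRange, PySem.List.pyRange_one_cons (show lo < hi + 1 by omega)]; rfl

lemma getD_setRange (m : List Bool) (lo hi : Int) (hlo : 0 ≤ lo) (hhi : hi < m.length)
    (j : Nat) (hj : j < m.length) :
    (setRange m lo hi).getD j false = (m.getD j false || decide (lo ≤ (j : Int) ∧ (j : Int) ≤ hi)) := by
  by_cases hle : hi < lo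
  · rw [setRange_nil m lo hi hle]
    have : ¬(lo ≤ (j : Int) ∧ (j : Int) ≤ hi) := by omega
    simp [this]
  · rw [setRange_cons m lo hi (by omega)]
    have hlt : lo < (m.length : Int) := by omega
    have hset : PySem.List.pySetD m lo true = m.set lo.toNat true :=
      PySem.List.pySetD_of_nonneg m true hlo
    have hlen : (PySem.List.pySetD m lo true).length = m.length := PySem.List.length_pySetD ..
    rw [getD_setRange (PySem.List.pySetD m lo true) (lo + 1) hi (by omega) (by omega) j (by omega)]
    rw [hset]
    rcases eq_or_ne lo.toNat j with he | hne
    · have hji : (j : Int) = lo := by omega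
      have : (m.set lo.toNat true).getD j false = true := by
        rw [List.getD_eq_getElem _ _ (by simpa using hj), List.getElem_set]
        simp [he]
      rw [this]
      have h1 : lo ≤ (j : Int) ∧ (j : Int) ≤ hi := by omega
      simp [h1]
    · have : (m.set lo.toNat true).getD j false = m.getD j false := by
        rw [List.getD_eq_getElem _ _ (by simpa using hj), List.getElem_set,
          List.getD_eq_getElem _ _ hj]
        simp [hne]
      rw [this]
      have hd : (decide (lo + 1 ≤ (j : Int) ∧ (j : Int) ≤ hi)) =
          (decide (lo ≤ (j : Int) ∧ (j : Int) ≤ hi)) := by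
        simp only [decide_eq_decide]; omega
      rw [hd]
termination_by (hi + 1 - lo).toNat
decreasing_by omega

def ivOK (n : Int) (p : Int × Int) : Prop := 0 ≤ p.1 ∧ p.1 ≤ p.2 ∧ p.2 < n

lemma length_foldl_setRange (ivs : List (Int × Int)) (m : List Bool) :
    (ivs.foldl (fun m p => setRange m p.1 p.2) m).length = m.length := by
  induction ivs generalizing m with
  | nil => rfl
  | cons p rest ih => simp [List.foldl_cons, ih, length_setRange]

lemma getD_foldl_setRange (ivs : List (Int × Int)) (m : List Bool)
    (hwf : ∀ p ∈ ivs, ivOK m.length p) (j : Nat) (hj : j < m.length) :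
    (ivs.foldl (fun m p => setRange m p.1 p.2) m).getD j false = (m.getD j false || cover ivs j) := by
  induction ivs generalizing m with
  | nil => simp [cover]
  | cons p rest ih =>
    have hp := hwf p (by simp)
    rw [List.foldl_cons, ih (setRange m p.1 p.2)
        (by rw [length_setRange]; intro q hq; exact hwf q (by simp [hq]))
        (by rw [length_setRange]; exact hj)]
    have hx := getD_setRange m p.1 p.2 hp.1 (by have := hp.2.2; omega) j hj
    rw [hx]
    simp [cover, Bool.or_assoc]

lemma length_diffAdd (d : List Int) (lo hi : Int) : (diffAdd d lo hi).length = d.length := by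
  simp [diffAdd, PySem.List.length_pySetD]

lemma length_foldl_diffAdd (ivs : List (Int × Int)) (d : List Int) :
    (ivs.foldl (fun d p => diffAdd d p.1 p.2) d).length = d.length := by
  induction ivs generalizing d with
  | nil => rfl
  | cons p rest ih => simp [List.foldl_cons, ih, length_diffAdd]

lemma psum_diffAdd (d : List Int) (n : Nat) (hd : d.length = n + 1) (lo hi : Int)
    (h0 : 0 ≤ lo) (hlh : lo ≤ hi) (hhi : hi < n) (j : Nat) (hj : j < n) :
    ((diffAdd d lo hi).take (j + 1)).sum =
      (d.take (j + 1)).sum + (if lo ≤ (j : Int) ∧ (j : Int) ≤ hi then 1 else 0) := by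
  have hlt : lo.toNat < d.length := by omega
  have hht : (hi + 1).toNat < d.length := by omega
  have hne : lo.toNat ≠ (hi + 1).toNat := by omega
  have hg1 : PySem.List.pyGetD d lo 0 = d[lo.toNat]'hlt :=
    PySem.List.pyGetD_eq_getElem d 0 h0 (by omega)
  set d1 := d.set lo.toNat (d[lo.toNat]'hlt + 1) with hd1
  have hg2 : PySem.List.pyGetD d1 (hi + 1) 0 = d1[(hi + 1).toNat]'(by simp [hd1]; omega) :=
    PySem.List.pyGetD_eq_getElem d1 0 (by omega) (by simp [hd1]; omega)
  have hd1hi : d1[(hi + 1).toNat]'(by simp [hd1]; omega) = d[(hi + 1).toNat]'hht := by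
    simp only [hd1, List.getElem_set]; simp [hne]
  simp only [diffAdd, hg1, PySem.List.pySetD_of_nonneg d _ h0, ← hd1, hg2, hd1hi,
    PySem.List.pySetD_of_nonneg d1 _ (by omega : (0:Int) ≤ hi + 1)]
  rw [sum_take_set d1 _ _ _ (by simp [hd1]; omega), hd1hi,
    sum_take_set d _ _ _ hlt]
  split_ifs <;> omega

lemma psum_foldl_diffAdd (ivs : List (Int × Int)) (n : Nat)
    (hwf : ∀ p ∈ ivs, ivOK n p) (d : List Int) (hd : d.length = n + 1) (j : Nat) (hj : j < n) :
    ((ivs.foldl (fun d p => diffAdd d p.1 p.2) d).take (j + 1)).sum =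
      (d.take (j + 1)).sum + ivs.countP (fun p => decide (p.1 ≤ (j : Int) ∧ (j : Int) ≤ p.2)) := by
  induction ivs generalizing d with
  | nil => simp
  | cons p rest ih =>
    have hp := hwf p (by simp)
    rw [List.foldl_cons,
      ih (fun q hq => hwf q (by simp [hq])) _ (by rw [length_diffAdd]; exact hd),
      psum_diffAdd d n hd p.1 p.2 hp.1 hp.2.1 (by exact_mod_cast hp.2.2) j hj,
      List.countP_cons]
    by_cases hc : p.1 ≤ (j : Int) ∧ (j : Int) ≤ p.2 <;> simp [hc] <;> push_cast <;> omega

lemma sweep_eq (d : List Int) (n : Nat) (hd : n ≤ d.length) :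
    sweep d n = (List.range n).map (fun j => decide (0 < (d.take (j + 1)).sum)) := by
  have key : ∀ m : Nat, m ≤ n →
      ((List.range m).foldl
        (fun (st : List Bool × Int) (j : Nat) =>
          (st.1 ++ [decide (st.2 + d.getD j 0 > 0)], st.2 + d.getD j 0)) ([], 0)) =
        ((List.range m).map (fun j => decide (0 < (d.take (j + 1)).sum)), (d.take m).sum) := by
    intro m hm
    induction m with
    | zero => simp
    | succ m ihm =>
      rw [List.range_succ, List.foldl_append, List.foldl_cons, List.foldl_nil,
        ihm (by omega)]
      have hmd : m < d.length := by omega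
      have : d.getD m 0 = d[m] := List.getD_eq_getElem d 0 hmd
      rw [this, ← List.sum_take_succ d m hmd]
      simp [List.range_succ]
  unfold sweep
  rw [PySem.List.pyRange_zero_natCast, List.foldl_map]
  have : (fun (st : List Bool × Int) (j : Nat) =>
      (st.1 ++ [decide (st.2 + PySem.List.pyGetD d (↑j) 0 > 0)], st.2 + PySem.List.pyGetD d (↑j) 0)) =
      (fun (st : List Bool × Int) (j : Nat) =>
        (st.1 ++ [decide (st.2 + d.getD j 0 > 0)], st.2 + d.getD j 0)) := by
    funext st j; rw [PySem.List.pyGetD_natCast]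
  rw [this, key n le_rfl]

lemma scan_eq (ids : List Int) : find_tag_spans ids = bScan ids := by
  show (PySem.List.pyRange 0 ((ids.length : Int) - 2) 1).foldl
      (fts_step ids (ids.length : Int)) ([], []) =
    (PySem.List.pyRange 1 ((ids.length : Int) - 3) 1).foldl (bScan_step ids) ([], [])
  by_cases h4 : 4 ≤ ids.length
  · have e1 : PySem.List.pyRange 0 ((ids.length : Int) - 2) 1 =
        PySem.List.pyRange 0 1 1 ++ (PySem.List.pyRange 1 ((ids.length : Int) - 3) 1 ++
          PySem.List.pyRange ((ids.length : Int) - 3) ((ids.length : Int) - 2) 1) := by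
      rw [← PySem.List.pyRange_one_append 1 ((ids.length : Int) - 3) ((ids.length : Int) - 2)
            (by omega) (by omega),
          ← PySem.List.pyRange_one_append 0 1 ((ids.length : Int) - 2) (by omega) (by omega)]
    rw [e1]
    have e2 : PySem.List.pyRange 0 1 1 = [0] := by
      simpa using PySem.List.pyRange_one_singleton (0 : Int)
    have e3 : PySem.List.pyRange ((ids.length : Int) - 3) ((ids.length : Int) - 2) 1 =
        [(ids.length : Int) - 3] := by
      have := PySem.List.pyRange_one_singleton ((ids.length : Int) - 3)
      rw [show (ids.length : Int) - 3 + 1 = (ids.length : Int) - 2 by omega] at this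
      exact this
    rw [e2, e3, List.foldl_append, List.foldl_append]
    simp only [List.foldl_cons, List.foldl_nil]
    rw [fts_step_zero, fts_step_last]
    exact PySem.List.foldl_congr_mem _ _ _ _ (fun st i hi => by
      have hmem := PySem.List.mem_pyRange_one.mp hi
      exact step_agree ids _ i hmem.1 (by omega) st)
  · by_cases h3 : ids.length = 3
    · rw [PySem.List.pyRange_one_eq_nil (a := 1) (by omega),
        show ((ids.length : Int) - 2) = 1 by omega]
      rw [show PySem.List.pyRange 0 1 1 = [0] from by
        simpa using PySem.List.pyRange_one_singleton (0 : Int)]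
      simp only [List.foldl_cons, List.foldl_nil]
      rw [fts_step_zero]
    · rw [PySem.List.pyRange_one_eq_nil (a := 0) (by omega),
        PySem.List.pyRange_one_eq_nil (a := 1) (by omega)]
      rfl

def spanOK (n : Int) (p : Int × Int) : Prop := 0 ≤ p.1 ∧ p.2 = p.1 + 4 ∧ p.2 < n

lemma foldl_pres {β : Type} (P : β → Prop) (f : β → Int → β) (l : List Int)
    (h : ∀ st i, i ∈ l → P st → P (f st i)) : ∀ st, P st → P (l.foldl f st) := by
  induction l with
  | nil => intro st hst; exact hst
  | cons x xs ih =>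
    intro st hst
    exact ih (fun st i hi hst => h st i (by simp [hi]) hst) _ (h st x (by simp) hst)

lemma bScan_wf (ids : List Int) :
    ∀ p ∈ (bScan ids).1 ++ (bScan ids).2, spanOK ids.length p := by
  show ∀ p ∈ ((PySem.List.pyRange 1 ((ids.length : Int) - 3) 1).foldl (bScan_step ids) ([], [])).1 ++
      ((PySem.List.pyRange 1 ((ids.length : Int) - 3) 1).foldl (bScan_step ids) ([], [])).2,
    spanOK ids.length p
  refine foldl_pres (fun st => ∀ p ∈ st.1 ++ st.2, spanOK ids.length p) _ _ ?_ ([], []) (by simp)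
  intro st i hi hst
  have hmem := PySem.List.mem_pyRange_one.mp hi
  simp only [bScan_step]
  split_ifs <;> intro p hp <;> simp only [List.mem_append, List.mem_singleton] at hp ⊢
  · rcases hp with (hp | hp) | hp
    · exact hst p (by simp [hp])
    · subst hp; refine ⟨by simp; omega, by simp; omega, by simp; omega⟩
    · exact hst p (by simp [hp])
  · rcases hp with hp | (hp | hp)
    · exact hst p (by simp [hp])
    · exact hst p (by simp [hp])
    · subst hp; refine ⟨by simp; omega, by simp; omega, by simp; omega⟩
  · exact hst p (by simpa using hp)
  · exact hst p (by simpa using hp)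

lemma bPairLoop_acc (ids : List Int) (n : Int) (v : String) (closes : List (Int × Int)) :
    ∀ (opens : List (Int × Int)) (ivs : List (Int × Int)) (pairs : Int) (ci : Nat),
      bPairLoop ids n v closes opens ivs pairs ci =
        (ivs ++ (bPairLoop ids n v closes opens [] 0 ci).1,
          pairs + (bPairLoop ids n v closes opens [] 0 ci).2) := by
  intro opens
  induction opens with
  | nil => intro ivs pairs ci; simp [bPairLoop]
  | cons o rest ih =>
    intro ivs pairs ci
    obtain ⟨o1, o2⟩ := o
    simp only [bPairLoop]
    by_cases hbr : skipCloses closes o2 ci ≥ closes.length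
    · simp [hbr]
    · simp only [if_neg hbr]
      have key : ∀ (L R : List (Int × Int)) (ci2 : Nat), L = ivs ++ R →
          bPairLoop ids n v closes rest L (pairs + 1) ci2 =
            (ivs ++ (bPairLoop ids n v closes rest R (0 + 1) ci2).1,
              pairs + (bPairLoop ids n v closes rest R (0 + 1) ci2).2) := by
        intro L R ci2 hLR
        rw [ih L, ih R, hLR]
        simp [Prod.ext_iff, List.append_assoc]
        omega
      by_cases hemp : (closes.getD (skipCloses closes o2 ci) (0, 0)).1 - 1 < o2 + 1
      · simp only [if_pos hemp]
        exact key ivs [] _ (by simp)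
      · simp only [if_neg hemp]
        apply key
        cases findImEnd ids ((closes.getD (skipCloses closes o2 ci) (0, 0)).2 + 1)
            (min n ((closes.getD (skipCloses closes o2 ci) (0, 0)).2 + 4)) <;>
          split_ifs <;> simp

lemma aPairLoop_eq (ids : List Int) (n : Int) (v : String) (closes : List (Int × Int)) :
    ∀ (opens : List (Int × Int)) (mask : List Bool) (pairs : Int) (ci : Nat),
      aPairLoop ids n v closes opens mask pairs ci =
        ((bPairLoop ids n v closes opens [] 0 ci).1.foldl (fun m p => setRange m p.1 p.2) mask,
          pairs + (bPairLoop ids n v closes opens [] 0 ci).2) := by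
  intro opens
  induction opens with
  | nil => intro mask pairs ci; simp [aPairLoop, bPairLoop]
  | cons o rest ih =>
    intro mask pairs ci
    obtain ⟨o1, o2⟩ := o
    simp only [aPairLoop, bPairLoop]
    by_cases hbr : skipCloses closes o2 ci ≥ closes.length
    · simp [hbr]
    · simp only [if_neg hbr]
      have key : ∀ (M : List Bool) (I : List (Int × Int)) (ci2 : Nat),
          M = I.foldl (fun m p => setRange m p.1 p.2) mask →
          aPairLoop ids n v closes rest M (pairs + 1) ci2 =
            ((bPairLoop ids n v closes rest I (0 + 1) ci2).1.foldl
                (fun m p => setRange m p.1 p.2) mask,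
              pairs + (bPairLoop ids n v closes rest I (0 + 1) ci2).2) := by
        intro M I ci2 hM
        rw [ih M, bPairLoop_acc ids n v closes rest I (0 + 1) ci2]
        simp only [List.foldl_append, ← hM, Prod.ext_iff]
        exact ⟨trivial, by omega⟩
      by_cases hemp : (closes.getD (skipCloses closes o2 ci) (0, 0)).1 - 1 < o2 + 1
      · simp only [if_pos hemp]
        exact key mask [] _ (by simp)
      · simp only [if_neg hemp]
        apply key
        by_cases hv : v = "v2" ∨ v = "v3" ∨ v = "v4" <;>
          cases hfi : findImEnd ids ((closes.getD (skipCloses closes o2 ci) (0, 0)).2 + 1)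
              (min n ((closes.getD (skipCloses closes o2 ci) (0, 0)).2 + 4)) <;>
            by_cases hv4 : v = "v4" <;>
              (simp [hv, hv4, hfi, List.foldl_append, setRange_singleton] <;>
                (split_ifs <;> simp [setRange_singleton]))

lemma bPairLoop_wf (ids : List Int) (v : String) (closes : List (Int × Int))
    (hcl : ∀ p ∈ closes, spanOK ids.length p) :
    ∀ (opens : List (Int × Int)), (∀ p ∈ opens, spanOK ids.length p) →
      ∀ (ci : Nat), ∀ q ∈ (bPairLoop ids ids.length v closes opens [] 0 ci).1,
        ivOK ids.length q := by
  intro opens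
  induction opens with
  | nil => intro _ ci q hq; simp [bPairLoop] at hq
  | cons o rest ih =>
    intro hop ci q hq
    obtain ⟨o1, o2⟩ := o
    simp only [bPairLoop, List.getD] at hq
    by_cases hbr : skipCloses closes o2 ci ≥ closes.length
    · simp [hbr] at hq
    · simp only [if_neg hbr] at hq
      have hlt : skipCloses closes o2 ci < closes.length := by omega
      have hrest : ∀ p ∈ rest, spanOK ids.length p := fun p hp => hop p (by simp [hp])
      have hcm : (closes[skipCloses closes o2 ci]?).getD (0, 0) ∈ closes := by
        simp only [List.getElem?_eq_getElem hlt, Option.getD_some]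
        exact List.getElem_mem hlt
      have hc := hcl _ hcm
      have ho := hop (o1, o2) (by simp)
      obtain ⟨hc0, hc4, hcn⟩ := hc
      obtain ⟨ho0, ho4, hon⟩ := ho
      simp only at ho0 ho4 hon
      set cpr := (closes[skipCloses closes o2 ci]?).getD (0, 0) with hcpr
      have him : ∀ k, findImEnd ids (cpr.2 + 1) (min (ids.length : Int) (cpr.2 + 4)) = some k →
          0 ≤ k ∧ k < (ids.length : Int) := by
        intro k hfi
        have hm := PySem.List.mem_pyRange_one.mp (List.mem_of_find?_eq_some hfi)
        exact ⟨by omega, lt_of_lt_of_le hm.2 (min_le_left _ _)⟩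
      by_cases hemp : cpr.1 - 1 < o2 + 1
      · simp only [if_pos hemp] at hq
        rw [bPairLoop_acc] at hq
        simp only [List.nil_append] at hq
        exact ih hrest _ q hq
      · simp only [if_neg hemp] at hq
        rw [bPairLoop_acc] at hq
        simp only [List.mem_append] at hq
        rcases hq with hq | hq
        · by_cases hv : v = "v2" ∨ v = "v3" ∨ v = "v4" <;>
            by_cases hv4 : v = "v4" <;>
              rcases hfi : findImEnd ids (cpr.2 + 1) (min (ids.length : Int) (cpr.2 + 4))
                with _ | k <;>
            simp only [hv, hv4, hfi, if_true, if_false, List.mem_append, List.mem_singleton,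
                List.mem_cons, List.not_mem_nil, or_false, false_or, if_pos, if_neg] at hq
          all_goals try have hk := him _ hfi
          all_goals try split_ifs at hq
          all_goals simp only [List.mem_append, List.mem_singleton, List.mem_cons,
            List.not_mem_nil, or_false, false_or, List.nil_append] at hq
          all_goals (first
            | (rcases hq with (rfl | rfl) | rfl)
            | (rcases hq with rfl | rfl | rfl)
            | (rcases hq with rfl | rfl)
            | (subst hq)) <;>
            exact ⟨by simp <;> omega, by simp <;> omega, by simp <;> omega⟩
        · exact ih hrest _ q hq


-- ===== VERDICT (by name: the statement is the Claim_ definition above) =====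
theorem build_new_mask_spec : Claim_equal_build_new_mask := by
  intro ids v _
  unfold Spec_build_new_mask
  simp only [build_new_mask, build_new_mask_alt]
  rw [scan_eq, aPairLoop_eq]
  have hwf_cl : ∀ p ∈ (bScan ids).2, spanOK ids.length p :=
    fun p hp => bScan_wf ids p (by simp [hp])
  have hwf_op : ∀ p ∈ (bScan ids).1, spanOK ids.length p :=
    fun p hp => bScan_wf ids p (by simp [hp])
  have hwf := bPairLoop_wf ids v (bScan ids).2 hwf_cl (bScan ids).1 hwf_op 0
  set B := bPairLoop ids (ids.length : Int) v (bScan ids).2 (bScan ids).1 [] 0 0 with hB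
  set diff := B.1.foldl (fun d p => diffAdd d p.1 p.2) (List.replicate (ids.length + 1) 0) with hdiff
  have hdl : diff.length = ids.length + 1 := by
    rw [hdiff, length_foldl_diffAdd, List.length_replicate]
  refine Prod.ext_iff.mpr ⟨?_, by simp⟩
  have hsw := sweep_eq diff ids.length (by omega)
  have hswc : sweep diff (ids.length : Int) =
      (List.range ids.length).map (fun j => decide (0 < (diff.take (j + 1)).sum)) := hsw
  rw [hswc]
  apply List.ext_getElem
  · rw [length_foldl_setRange, List.length_replicate, List.length_map, List.length_range]
  · intro j hj hj2
    have hjlen : j < ids.length := by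
      rw [length_foldl_setRange, List.length_replicate] at hj; exact hj
    rw [← List.getD_eq_getElem _ false hj,
      getD_foldl_setRange B.1 (List.replicate ids.length false)
        (by simpa using hwf) j (by simpa using hjlen)]
    simp only [List.getElem_map, List.getElem_range]
    have hps0 : (diff.take (j + 1)).sum =
        (B.1.countP (fun p => decide (p.1 ≤ (j : Int) ∧ (j : Int) ≤ p.2)) : Int) := by
      rw [hdiff, psum_foldl_diffAdd B.1 ids.length (by simpa using hwf) _ (by simp) j hjlen]
      simp
    rw [hps0, ← cover_iff_countP]
    simp
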